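-- pv_equiv track=rewrite | github.com/Fondamenti18/fondamenti-di-programmazione | students/1799754/homework04/program01.py | albero
-- ===== SOURCE A (Python) =====
-- def albero(a,y,c,d,i):
--     v = a[i]
--     if len(v) == y :
--         c = c + 1
--     for x in v :
--         d[x] = c
--         albero(a,y,c,d,x)
--     return d
-- ===== SOURCE B (Python) =====
-- # Iterative re-implementation: explicit LIFO stack of (node, counter) pairs
-- # instead of recursion; reproduces A's preorder write sequence exactly.
-- # Like A, it mutates d in place and returns it.
-- def albero(a, y, c, d, i):
--     v = a[i]
--     if len(v) == y:
--         c = c + 1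
--     stack = [(x, c) for x in reversed(v)]
--     while stack:
--         x, cv = stack.pop()
--         d[x] = cv
--         vx = a[x]
--         cx = cv + 1 if len(vx) == y else cv
--         for ch in reversed(vx):
--             stack.append((ch, cx))
--     return d
-- ===== Notes on version B (the rewrite author's own statement) =====
-- stated objective: alternative
-- what changed: The recursive preorder traversal is replaced by an iterative loop over an explicit LIFO stack of (node, counter) pairs (children pushed in reverse), which reproduces A's exact preorder write sequence into d without recursion.
import Mathlib
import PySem

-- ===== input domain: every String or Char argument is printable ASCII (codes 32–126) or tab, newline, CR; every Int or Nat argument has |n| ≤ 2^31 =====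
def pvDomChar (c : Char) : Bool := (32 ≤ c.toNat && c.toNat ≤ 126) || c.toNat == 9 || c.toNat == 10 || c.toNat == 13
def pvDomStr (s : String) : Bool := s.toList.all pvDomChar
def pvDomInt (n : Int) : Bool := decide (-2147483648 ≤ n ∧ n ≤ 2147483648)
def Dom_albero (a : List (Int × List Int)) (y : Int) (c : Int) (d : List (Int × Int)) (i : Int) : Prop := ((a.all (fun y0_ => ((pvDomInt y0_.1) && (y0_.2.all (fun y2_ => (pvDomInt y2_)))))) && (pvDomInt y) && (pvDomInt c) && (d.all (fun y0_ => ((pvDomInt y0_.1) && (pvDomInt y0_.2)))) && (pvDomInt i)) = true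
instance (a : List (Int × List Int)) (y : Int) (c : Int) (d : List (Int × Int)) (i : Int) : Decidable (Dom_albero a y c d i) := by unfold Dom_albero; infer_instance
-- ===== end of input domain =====

-- B replaces A's recursion by an explicit LIFO stack of (node, counter) pairs; the proved
-- equivalence is about the returned dict (both Pythons mutate d in place the same way).

-- ===== PORT A =====
-- A is recursive; the port threads an Option through a fuel parameter:
-- `none` means "the Python raises here" (KeyError on a missing key, or fuel exhausted —
-- under Pre_albero the fuel a.length+1 is proved sufficient, so `none` is unreachable).
mutual
def alberoRecO (a : List (Int × List Int)) (y : Int) : Nat → Int → Int → PySem.Dict Int Int → Option (PySem.Dict Int Int)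
  | 0, _, _, _ => none
  | fuel+1, i, c, d =>
    match PySem.Dict.get? (PySem.Dict.mk a) i with      -- v = a[i]
    | none => none                                       -- KeyError
    | some v =>
      let c' := if (v.length : Int) = y then c + 1 else c
      alberoFoldO a y fuel (v.map (fun x => (x, c'))) d  -- for x in v: d[x] = c'; albero(a,y,c',d,x)
termination_by fuel _ _ _ => (fuel, 0)

def alberoFoldO (a : List (Int × List Int)) (y : Int) : Nat → List (Int × Int) → PySem.Dict Int Int → Option (PySem.Dict Int Int)
  | _, [], d => some d
  | fuel, (x,cv)::rest, d =>
    match alberoRecO a y fuel x cv (PySem.Dict.insert d x cv) with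
    | none => none
    | some d1 => alberoFoldO a y fuel rest d1
termination_by fuel pairs _ => (fuel, pairs.length + 1)
end

def albero (a : List (Int × List Int)) (y : Int) (c : Int) (d : List (Int × Int)) (i : Int) : List (Int × Int) :=
  ((alberoRecO a y (a.length + 1) i c (PySem.Dict.mk d)).getD (PySem.Dict.mk d)).items

-- ===== PORT B =====
-- Transcription of Source B.  The stack is a Lean list with its HEAD as the top, so Source B's
-- "push the children reversed, pop from the end" is exactly "prepend the children in order".
-- `none` again means "the Python raises" (KeyError) or fuel ran out (Source B has no fuel; under
-- Pre_albero the fuel (maxDeg+1)^(a.length+1) is proved sufficient, so `none` is unreachable).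
def alberoStackO (a : List (Int × List Int)) (y : Int) : Nat → List (Int × Int) → PySem.Dict Int Int → Option (PySem.Dict Int Int)
  | 0, _, _ => none
  | _+1, [], d => some d
  | fuel+1, (x,cv)::st, d =>
    let d' := PySem.Dict.insert d x cv                   -- d[x] = cv
    match PySem.Dict.get? (PySem.Dict.mk a) x with       -- vx = a[x]
    | none => none                                       -- KeyError
    | some vx =>
      let cx := if (vx.length : Int) = y then cv + 1 else cv
      alberoStackO a y fuel (vx.map (fun ch => (ch, cx)) ++ st) d'

def maxDeg (a : List (Int × List Int)) : Nat := a.foldr (fun p m => max p.2.length m) 0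

def albero_alt (a : List (Int × List Int)) (y : Int) (c : Int) (d : List (Int × Int)) (i : Int) : List (Int × Int) :=
  match PySem.Dict.get? (PySem.Dict.mk a) i with
  | none => d
  | some v =>
    let c' := if (v.length : Int) = y then c + 1 else c
    ((alberoStackO a y ((maxDeg a + 1) ^ (a.length + 1))
        (v.map (fun x => (x, c'))) (PySem.Dict.mk d)).getD (PySem.Dict.mk d)).items

-- ===== PRECONDITION & SPEC =====
-- Reachability closure of the input graph (used only to STATE Pre_: it computes the set of
-- nodes reachable from i by membership iteration, not either algorithm's labelling).
def pvChildren (a : List (Int × List Int)) (x : Int) : List Int :=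
  (PySem.Dict.get? (PySem.Dict.mk a) x).getD []
def pvStep (a : List (Int × List Int)) (s : List Int) : List Int :=
  (s ++ s.flatMap (pvChildren a)).dedup
def pvUniv (a : List (Int × List Int)) (i : Int) : List Int := i :: a.flatMap (fun p => p.2)
def pvN (a : List (Int × List Int)) (i : Int) : Nat := (pvUniv a i).dedup.length
def pvClos (a : List (Int × List Int)) (i : Int) (s : List Int) : List Int :=
  (pvStep a)^[Nat.succ (pvN a i)] s
def pvReach (a : List (Int × List Int)) (i : Int) : List Int := pvClos a i [i]

-- Pre_ excludes exactly the inputs on which the Python A raises: a KeyError (some node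
-- reachable from i is not a key of a) or unbounded recursion (some node reachable from i can
-- reach itself, i.e. a cycle: RecursionError in A, an endless loop in B).
def Pre_albero (a : List (Int × List Int)) (y : Int) (c : Int) (d : List (Int × Int)) (i : Int) : Prop :=
  (∀ x ∈ pvReach a i, (PySem.Dict.get? (PySem.Dict.mk a) x).isSome = true) ∧
  (∀ x ∈ pvReach a i, x ∉ pvClos a i (pvChildren a x))
instance (a : List (Int × List Int)) (y : Int) (c : Int) (d : List (Int × Int)) (i : Int) : Decidable (Pre_albero a y c d i) := by unfold Pre_albero; infer_instance
def pvWitness_albero : (List (Int × List Int)) × Int × Int × (List (Int × Int)) × Int :=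
  ([(0, [1, 2]), (1, [2]), (2, [])], 1, 0, [(5, 7)], 0)
def Spec_albero (a : List (Int × List Int)) (y : Int) (c : Int) (d : List (Int × Int)) (i : Int) (out : List (Int × Int)) : Prop := out = albero_alt a y c d i
instance (a : List (Int × List Int)) (y : Int) (c : Int) (d : List (Int × Int)) (i : Int) (out : List (Int × Int)) : Decidable (Spec_albero a y c d i out) := by unfold Spec_albero; infer_instance

-- ===== CLAIM (what is proved, stated in full; the proofs are below) =====
def Claim_equal_albero : Prop := ∀ (a : List (Int × List Int)) (y : Int) (c : Int) (d : List (Int × Int)) (i : Int), Dom_albero a y c d i → Pre_albero a y c d i → Spec_albero a y c d i (albero a y c d i)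

-- ===== LEMMAS AND PROOFS =====

def pvIsKey (a : List (Int × List Int)) (x : Int) : Prop :=
  (PySem.Dict.get? (PySem.Dict.mk a) x).isSome = true

theorem pv_get?_mem {a : List (Int × List Int)} {x : Int} {v : List Int}
    (h : PySem.Dict.get? (PySem.Dict.mk a) x = some v) : (x, v) ∈ a := by
  induction a with
  | nil => simp [PySem.Dict.get?] at h
  | cons p rest ih =>
    obtain ⟨k, vs⟩ := p
    rw [PySem.Dict.get?_mk_cons] at h
    by_cases he : k = x
    · subst he
      simp at h
      subst h
      exact List.mem_cons_self
    · simp [he] at h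
      exact List.mem_cons_of_mem _ (ih h)

theorem pv_len_le_maxDeg {a : List (Int × List Int)} {x : Int} {v : List Int}
    (h : (x, v) ∈ a) : v.length ≤ maxDeg a := by
  induction a with
  | nil => simp at h
  | cons p rest ih =>
    rcases List.mem_cons.mp h with h | h
    · subst h; simp [maxDeg, List.foldr_cons]
    · calc v.length ≤ maxDeg rest := ih h
        _ ≤ maxDeg (p :: rest) := by simp [maxDeg, List.foldr_cons]

-- elementary facts about one closure step
theorem pv_mem_step_self {a : List (Int × List Int)} {s : List Int} {z : Int}
    (h : z ∈ s) : z ∈ pvStep a s := by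
  simp [pvStep]
  exact Or.inl h

theorem pv_mem_step_child {a : List (Int × List Int)} {s : List Int} {z ch : Int}
    (hz : z ∈ s) (hch : ch ∈ pvChildren a z) : ch ∈ pvStep a s := by
  simp [pvStep]
  exact Or.inr ⟨z, hz, hch⟩

theorem pv_step_subset {a : List (Int × List Int)} {s t : List Int}
    (h : ∀ z ∈ s, z ∈ t) : ∀ z ∈ pvStep a s, z ∈ pvStep a t := by
  intro z hz
  simp [pvStep] at hz ⊢
  rcases hz with hz | ⟨w, hw, hz⟩
  · exact Or.inl (h z hz)
  · exact Or.inr ⟨w, h w hw, hz⟩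

theorem pv_children_univ {a : List (Int × List Int)} {i x z : Int}
    (h : z ∈ pvChildren a x) : z ∈ pvUniv a i := by
  unfold pvChildren at h
  cases hv : PySem.Dict.get? (PySem.Dict.mk a) x with
  | none => rw [hv] at h; simp at h
  | some v =>
    rw [hv] at h
    simp at h
    have hm := pv_get?_mem hv
    simp [pvUniv]
    right
    exact ⟨x, v, hm, h⟩

theorem pv_step_univ {a : List (Int × List Int)} {i : Int} {s : List Int}
    (h : ∀ z ∈ s, z ∈ pvUniv a i) : ∀ z ∈ pvStep a s, z ∈ pvUniv a i := by
  intro z hz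
  simp [pvStep] at hz
  rcases hz with hz | ⟨w, hw, hz⟩
  · exact h z hz
  · exact pv_children_univ hz

theorem pv_iter_univ {a : List (Int × List Int)} {i : Int} {s : List Int}
    (h : ∀ z ∈ s, z ∈ pvUniv a i) :
    ∀ k, ∀ z ∈ (pvStep a)^[k] s, z ∈ pvUniv a i := by
  intro k
  induction k with
  | zero => simpa using h
  | succ k ih =>
    rw [Function.iterate_succ_apply']
    exact pv_step_univ ih

theorem pv_iter_le {a : List (Int × List Int)} {s : List Int} {z : Int} :
    ∀ k m, z ∈ (pvStep a)^[k] s → z ∈ (pvStep a)^[k + m] s := by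
  intro k m
  induction m with
  | zero => exact id
  | succ m ih =>
    intro hz
    rw [show k + (m + 1) = (k + m) + 1 by omega, Function.iterate_succ_apply']
    exact pv_mem_step_self (ih hz)

theorem pv_clos_extensive {a : List (Int × List Int)} {i : Int} {s : List Int} {z : Int}
    (h : z ∈ s) : z ∈ pvClos a i s := by
  have := pv_iter_le (a := a) (s := s) (z := z) 0 (pvN a i + 1) (by simpa using h)
  simpa [pvClos] using this

-- the iterated step reaches a membership fixpoint: the closure is closed under pvStep
theorem pv_clos_closed {a : List (Int × List Int)} {i : Int} {s : List Int}
    (hs : ∀ z ∈ s, z ∈ pvUniv a i) :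
    ∀ z ∈ pvStep a (pvClos a i s), z ∈ pvClos a i s := by
  set N := pvN a i with hN
  have hstepF : ∀ u v : List Int, u.toFinset = v.toFinset →
      (pvStep a u).toFinset = (pvStep a v).toFinset := by
    intro u v huv
    ext z
    simp only [List.mem_toFinset]
    constructor
    · exact fun hz => pv_step_subset
        (fun w hw => List.mem_toFinset.mp (huv ▸ List.mem_toFinset.mpr hw)) z hz
    · exact fun hz => pv_step_subset
        (fun w hw => List.mem_toFinset.mp (huv.symm ▸ List.mem_toFinset.mpr hw)) z hz
  have hmono : ∀ k, ((pvStep a)^[k] s).toFinset ⊆ ((pvStep a)^[k + 1] s).toFinset := by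
    intro k z hz
    rw [Function.iterate_succ_apply']
    exact List.mem_toFinset.mpr (pv_mem_step_self (List.mem_toFinset.mp hz))
  have hfixprop : ∀ k m, ((pvStep a)^[k + 1] s).toFinset = ((pvStep a)^[k] s).toFinset →
      ((pvStep a)^[k + m] s).toFinset = ((pvStep a)^[k] s).toFinset := by
    intro k m hfix
    induction m with
    | zero => rfl
    | succ m ih =>
      rw [show k + (m + 1) = (k + m) + 1 by omega, Function.iterate_succ_apply']
      calc (pvStep a ((pvStep a)^[k + m] s)).toFinset
          = (pvStep a ((pvStep a)^[k] s)).toFinset := hstepF _ _ ih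
        _ = ((pvStep a)^[k] s).toFinset := by
            rw [← Function.iterate_succ_apply' (pvStep a) k s]; exact hfix
  have hbound : ∀ k, ((pvStep a)^[k] s).toFinset ⊆ (pvUniv a i).toFinset := by
    intro k z hz
    exact List.mem_toFinset.mpr (pv_iter_univ hs k z (List.mem_toFinset.mp hz))
  have hex : ∃ k, k ≤ N ∧ ((pvStep a)^[k + 1] s).toFinset = ((pvStep a)^[k] s).toFinset := by
    by_contra hcon
    push_neg at hcon
    have hcards : ∀ k, k ≤ N + 1 → k ≤ ((pvStep a)^[k] s).toFinset.card := by
      intro k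
      induction k with
      | zero => omega
      | succ k ih =>
        intro hk
        have h1 := ih (by omega)
        have hss : ((pvStep a)^[k] s).toFinset ⊂ ((pvStep a)^[k + 1] s).toFinset :=
          HasSubset.Subset.ssubset_of_ne (hmono k) (fun he => hcon k (by omega) he.symm)
        have := Finset.card_lt_card hss
        omega
    have h1 := hcards (N + 1) le_rfl
    have h2 := Finset.card_le_card (hbound (N + 1))
    have h3 : (pvUniv a i).toFinset.card = N := by
      simp [List.card_toFinset, hN, pvN]
    omega
  obtain ⟨k, hk, hfix⟩ := hex
  have hNfix : ((pvStep a)^[N + 1] s).toFinset = ((pvStep a)^[k] s).toFinset := by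
    have := hfixprop k (N + 1 - k) hfix
    rw [show k + (N + 1 - k) = N + 1 by omega] at this
    exact this
  have hstepfix : (pvStep a ((pvStep a)^[N + 1] s)).toFinset = ((pvStep a)^[N + 1] s).toFinset := by
    calc (pvStep a ((pvStep a)^[N + 1] s)).toFinset
        = (pvStep a ((pvStep a)^[k] s)).toFinset := hstepF _ _ hNfix
      _ = ((pvStep a)^[k + 1] s).toFinset := by
            rw [Function.iterate_succ_apply' (pvStep a) k s]
      _ = ((pvStep a)^[k] s).toFinset := hfix
      _ = ((pvStep a)^[N + 1] s).toFinset := hNfix.symm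
  intro z hz
  have : z ∈ (pvStep a ((pvStep a)^[N + 1] s)).toFinset := by
    exact List.mem_toFinset.mpr (by simpa [pvClos, hN] using hz)
  rw [hstepfix] at this
  simpa [pvClos, hN] using List.mem_toFinset.mp this

theorem pv_clos_min {a : List (Int × List Int)} {i : Int} {s T : List Int}
    (hsT : ∀ z ∈ s, z ∈ T)
    (hclosed : ∀ z ∈ T, ∀ ch ∈ pvChildren a z, ch ∈ T) :
    ∀ z ∈ pvClos a i s, z ∈ T := by
  have : ∀ k, ∀ z ∈ (pvStep a)^[k] s, z ∈ T := by
    intro k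
    induction k with
    | zero => simpa using hsT
    | succ k ih =>
      rw [Function.iterate_succ_apply']
      intro z hz
      simp [pvStep] at hz
      rcases hz with hz | ⟨w, hw, hz⟩
      · exact ih z hz
      · exact hclosed w (ih w hw) z hz
  exact this (pvN a i + 1)

theorem pv_univ_reach {a : List (Int × List Int)} {i x : Int}
    (h : x ∈ pvReach a i) : x ∈ pvUniv a i :=
  pv_iter_univ (by simp [pvUniv]) (pvN a i + 1) x h

theorem pv_reach_closed {a : List (Int × List Int)} {i x ch : Int}
    (hx : x ∈ pvReach a i) (hch : ch ∈ pvChildren a x) : ch ∈ pvReach a i :=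
  pv_clos_closed (by simp [pvUniv]) ch (pv_mem_step_child hx hch)

-- the rank of a node: how many distinct KEYS it can reach (including itself when it is a key)
def pvRank (a : List (Int × List Int)) (i x : Int) : Nat :=
  ((pvClos a i [x]).toFinset.filter
    (fun z => (PySem.Dict.get? (PySem.Dict.mk a) z).isSome = true)).card

theorem pv_rank_child_lt {a : List (Int × List Int)} {i x ch : Int}
    (hx : x ∈ pvReach a i)
    (hkey : pvIsKey a x)
    (hacy : x ∉ pvClos a i (pvChildren a x))
    (hch : ch ∈ pvChildren a x) : pvRank a i ch < pvRank a i x := by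
  have hxu : ∀ z ∈ [x], z ∈ pvUniv a i := by
    intro z hz; simp at hz; subst hz; exact pv_univ_reach hx
  have hchu : ∀ z ∈ pvChildren a x, z ∈ pvUniv a i := fun z hz => pv_children_univ hz
  have hx_self : x ∈ pvClos a i [x] := pv_clos_extensive (by simp)
  have hch_in : ch ∈ pvClos a i [x] :=
    pv_clos_closed hxu ch (pv_mem_step_child hx_self hch)
  -- clos [ch] ⊆ clos [x]
  have hsub : ∀ z ∈ pvClos a i [ch], z ∈ pvClos a i [x] :=
    pv_clos_min (by intro z hz; simp at hz; subst hz; exact hch_in)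
      (fun z hz w hw => pv_clos_closed hxu w (pv_mem_step_child hz hw))
  -- x ∉ clos [ch] (else x would reach itself through ch)
  have hxnot : x ∉ pvClos a i [ch] := by
    intro hmem
    apply hacy
    exact pv_clos_min
      (by intro z hz; simp at hz; subst hz; exact pv_clos_extensive hch)
      (fun z hz w hw => pv_clos_closed hchu w (pv_mem_step_child hz hw))
      x hmem
  apply Finset.card_lt_card
  constructor
  · intro z hz
    simp only [Finset.mem_filter, List.mem_toFinset] at hz ⊢
    exact ⟨hsub z hz.1, hz.2⟩
  · intro hcon
    have hxin : x ∈ (pvClos a i [x]).toFinset.filter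
        (fun z => (PySem.Dict.get? (PySem.Dict.mk a) z).isSome = true) := by
      simp only [Finset.mem_filter, List.mem_toFinset]
      exact ⟨hx_self, hkey⟩
    have := hcon hxin
    simp only [Finset.mem_filter, List.mem_toFinset] at this
    exact hxnot this.1

theorem pv_rank_le_length (a : List (Int × List Int)) (i x : Int) :
    pvRank a i x ≤ a.length := by
  have hsub : ((pvClos a i [x]).toFinset.filter
      (fun z => (PySem.Dict.get? (PySem.Dict.mk a) z).isSome = true)) ⊆
      (a.map Prod.fst).toFinset := by
    intro z hz
    simp only [Finset.mem_filter] at hz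
    obtain ⟨v, hv⟩ := Option.isSome_iff_exists.mp hz.2
    have := pv_get?_mem hv
    simp only [List.mem_toFinset, List.mem_map]
    exact ⟨(z, v), this, rfl⟩
  calc pvRank a i x ≤ (a.map Prod.fst).toFinset.card := Finset.card_le_card hsub
    _ ≤ (a.map Prod.fst).length := List.toFinset_card_le _
    _ = a.length := by simp

-- children of a key as a list value
theorem pv_children_eq {a : List (Int × List Int)} {x : Int} {v : List Int}
    (hv : PySem.Dict.get? (PySem.Dict.mk a) x = some v) : pvChildren a x = v := by
  simp [pvChildren, hv]

-- fuel sufficiency for the recursive port A (i0 is the root the claim starts from)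
theorem pv_suff_rec {a : List (Int × List Int)} {y : Int} {i0 : Int}
    (H1 : ∀ x ∈ pvReach a i0, pvIsKey a x)
    (H2 : ∀ x ∈ pvReach a i0, x ∉ pvClos a i0 (pvChildren a x)) :
    ∀ fuel : Nat,
      (∀ pairs d, (∀ p ∈ pairs, p.1 ∈ pvReach a i0 ∧ pvRank a i0 p.1 + 1 ≤ fuel) →
        (alberoFoldO a y fuel pairs d).isSome = true) ∧
      (∀ x cv d, x ∈ pvReach a i0 → pvRank a i0 x + 1 ≤ fuel →
        (alberoRecO a y fuel x cv d).isSome = true) := by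
  intro fuel
  induction fuel with
  | zero =>
    constructor
    · intro pairs d h
      cases pairs with
      | nil => simp [alberoFoldO]
      | cons p rest =>
        have := (h p List.mem_cons_self).2
        omega
    · intro x cv d _ hr; omega
  | succ f ih =>
    have hrec : ∀ x cv d, x ∈ pvReach a i0 → pvRank a i0 x + 1 ≤ f + 1 →
        (alberoRecO a y (f + 1) x cv d).isSome = true := by
      intro x cv d hx hr
      obtain ⟨v, hv⟩ := Option.isSome_iff_exists.mp (H1 x hx)
      simp only [alberoRecO, hv]
      apply ih.1
      intro p hp
      obtain ⟨ch, hch, rfl⟩ := List.mem_map.mp hp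
      have hch' : ch ∈ pvChildren a x := by rw [pv_children_eq hv]; exact hch
      have hlt := pv_rank_child_lt hx (H1 x hx) (H2 x hx) hch'
      refine ⟨pv_reach_closed hx hch', ?_⟩
      simpa using (show pvRank a i0 ch + 1 ≤ f by omega)
    refine ⟨?_, hrec⟩
    intro pairs
    induction pairs with
    | nil => intro d _; simp [alberoFoldO]
    | cons p rest ihp =>
      intro d h
      obtain ⟨x, cv⟩ := p
      obtain ⟨hk, hr⟩ := h (x, cv) List.mem_cons_self
      obtain ⟨d1, hd1⟩ := Option.isSome_iff_exists.mp (hrec x cv (PySem.Dict.insert d x cv) hk hr)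
      simp only [alberoFoldO, hd1]
      exact ihp d1 (fun q hq => h q (List.mem_cons_of_mem _ hq))

def pvW (a : List (Int × List Int)) (i0 x : Int) : Nat := (maxDeg a + 1) ^ (pvRank a i0 x)

def pvPhi (a : List (Int × List Int)) (i0 : Int) (st : List (Int × Int)) : Nat :=
  (st.map (fun p => pvW a i0 p.1)).sum

-- the per-node potential strictly covers a node plus all its children
theorem pv_sumW {a : List (Int × List Int)} {i0 : Int}
    (H1 : ∀ x ∈ pvReach a i0, pvIsKey a x)
    (H2 : ∀ x ∈ pvReach a i0, x ∉ pvClos a i0 (pvChildren a x))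
    {x : Int} {v : List Int} (hx : x ∈ pvReach a i0)
    (hv : PySem.Dict.get? (PySem.Dict.mk a) x = some v) :
    (v.map (pvW a i0)).sum + 1 ≤ pvW a i0 x := by
  have hkids : ∀ ch ∈ v, pvRank a i0 ch < pvRank a i0 x := by
    intro ch hch
    exact pv_rank_child_lt hx (H1 x hx) (H2 x hx) (by rw [pv_children_eq hv]; exact hch)
  cases hv' : v with
  | nil => simp [pvW]; exact Nat.one_le_pow _ _ (by omega)
  | cons ch0 tl =>
    subst hv'
    have hr0 : 1 ≤ pvRank a i0 x := by
      have := hkids ch0 List.mem_cons_self; omega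
    obtain ⟨rr, hrr⟩ : ∃ rr, pvRank a i0 x = rr + 1 := ⟨pvRank a i0 x - 1, by omega⟩
    set M := maxDeg a with hM
    have hbound : ∀ w ∈ (ch0 :: tl).map (pvW a i0), w ≤ (M + 1) ^ rr := by
      intro w hw
      obtain ⟨ch, hch, rfl⟩ := List.mem_map.mp hw
      have := hkids ch hch
      exact Nat.pow_le_pow_right (by omega) (by omega)
    have hsum : ((ch0 :: tl).map (pvW a i0)).sum ≤ ((ch0 :: tl).map (pvW a i0)).length * ((M + 1) ^ rr) := by
      calc ((ch0 :: tl).map (pvW a i0)).sum ≤ ((ch0 :: tl).map (pvW a i0)).length • ((M + 1) ^ rr) :=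
            List.sum_le_card_nsmul _ _ hbound
        _ = ((ch0 :: tl).map (pvW a i0)).length * ((M + 1) ^ rr) := by simp [smul_eq_mul]
    have hlen : (ch0 :: tl).length ≤ M := pv_len_le_maxDeg (pv_get?_mem hv)
    have hP : 1 ≤ (M + 1) ^ rr := Nat.one_le_pow _ _ (by omega)
    have hmul : ((ch0 :: tl).map (pvW a i0)).sum ≤ M * ((M + 1) ^ rr) := by
      calc ((ch0 :: tl).map (pvW a i0)).sum ≤ ((ch0 :: tl).map (pvW a i0)).length * ((M + 1) ^ rr) := hsum
        _ = (ch0 :: tl).length * ((M + 1) ^ rr) := by rw [List.length_map]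
        _ ≤ M * ((M + 1) ^ rr) := Nat.mul_le_mul_right _ hlen
    have hpow : pvW a i0 x = (M + 1) ^ rr * (M + 1) := by
      simp only [pvW, hrr, ← hM, pow_succ]
    have hexp : (M + 1) ^ rr * (M + 1) = M * ((M + 1) ^ rr) + (M + 1) ^ rr := by ring
    omega

-- fuel sufficiency for the stack port B
theorem pv_suff_stack {a : List (Int × List Int)} {y : Int} {i0 : Int}
    (H1 : ∀ x ∈ pvReach a i0, pvIsKey a x)
    (H2 : ∀ x ∈ pvReach a i0, x ∉ pvClos a i0 (pvChildren a x)) :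
    ∀ fuel st d, (∀ p ∈ st, p.1 ∈ pvReach a i0) → pvPhi a i0 st + 1 ≤ fuel →
      (alberoStackO a y fuel st d).isSome = true := by
  intro fuel
  induction fuel with
  | zero => intro st d _ h; omega
  | succ f ih =>
    intro st d hkeys hphi
    cases st with
    | nil => simp [alberoStackO]
    | cons p st =>
      obtain ⟨x, cv⟩ := p
      have hx : x ∈ pvReach a i0 := hkeys (x, cv) List.mem_cons_self
      obtain ⟨vx, hvx⟩ := Option.isSome_iff_exists.mp (H1 x hx)
      simp only [alberoStackO, hvx]
      apply ih
      · intro q hq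
        rcases List.mem_append.mp hq with hq | hq
        · obtain ⟨ch, hch, rfl⟩ := List.mem_map.mp hq
          exact pv_reach_closed hx (by rw [pv_children_eq hvx]; exact hch)
        · exact hkeys q (List.mem_cons_of_mem _ hq)
      · have hsplit : pvPhi a i0 ((x, cv) :: st) = pvW a i0 x + pvPhi a i0 st := by
          simp [pvPhi]
        have happ : ∀ (cx : Int), pvPhi a i0 (vx.map (fun ch => (ch, cx)) ++ st)
            = (vx.map (pvW a i0)).sum + pvPhi a i0 st := by
          intro cx
          simp [pvPhi, List.map_append, List.map_map, Function.comp_def]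
        rw [happ]
        have hthis : (vx.map (pvW a i0)).sum + 1 ≤ pvW a i0 x := pv_sumW H1 H2 hx hvx
        omega


-- fuel monotonicity and uniqueness for the stack port
theorem pv_mono_stack {a : List (Int × List Int)} {y : Int} :
    ∀ {f : Nat} {st d o}, alberoStackO a y f st d = some o →
      alberoStackO a y (f + 1) st d = some o := by
  intro f
  induction f with
  | zero => intro st d o h; simp [alberoStackO] at h
  | succ f ih =>
    intro st d o h
    cases st with
    | nil => simpa [alberoStackO] using h
    | cons p st =>
      obtain ⟨x, cv⟩ := p
      simp only [alberoStackO] at h ⊢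
      cases hvx : PySem.Dict.get? (PySem.Dict.mk a) x with
      | none => rw [hvx] at h; simp at h
      | some vx => rw [hvx] at h; exact ih h

theorem pv_mono_stack_le {a : List (Int × List Int)} {y : Int} {f f' : Nat} {st d o}
    (hle : f ≤ f') (h : alberoStackO a y f st d = some o) :
    alberoStackO a y f' st d = some o := by
  induction f' with
  | zero => rw [Nat.le_zero.mp hle] at h; exact h
  | succ f' ih =>
    rcases Nat.lt_or_ge f (f' + 1) with hf | hf
    · exact pv_mono_stack (ih (by omega))
    · have hf' : f = f' + 1 := by omega
      rw [hf'] at h; exact h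

theorem pv_stack_unique {a : List (Int × List Int)} {y : Int} {f f' : Nat} {st d o o'}
    (h : alberoStackO a y f st d = some o) (h' : alberoStackO a y f' st d = some o') :
    o = o' := by
  have h1 := pv_mono_stack_le (Nat.le_max_left f f') h
  have h2 := pv_mono_stack_le (Nat.le_max_right f f') h'
  rw [h1] at h2
  exact Option.some_inj.mp h2

-- the simulation: a completed fold of A's recursion is a completed run of B's stack loop
theorem pv_sim {a : List (Int × List Int)} {y : Int} :
    ∀ (fa : Nat) (pairs st : List (Int × Int)) (d r : PySem.Dict Int Int) (fs2 : Nat)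
      (out : PySem.Dict Int Int),
      alberoFoldO a y fa pairs d = some r →
      alberoStackO a y fs2 st r = some out →
      ∃ fs, alberoStackO a y fs (pairs ++ st) d = some out := by
  intro fa
  induction fa with
  | zero =>
    intro pairs st d r fs2 out h1 h2
    cases pairs with
    | nil =>
      simp [alberoFoldO] at h1
      subst h1
      exact ⟨fs2, h2⟩
    | cons p rest =>
      obtain ⟨x, cv⟩ := p
      simp [alberoFoldO, alberoRecO] at h1
  | succ fb ih =>
    intro pairs
    induction pairs with
    | nil =>
      intro st d r fs2 out h1 h2
      simp [alberoFoldO] at h1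
      subst h1
      exact ⟨fs2, h2⟩
    | cons p rest ihp =>
      intro st d r fs2 out h1 h2
      obtain ⟨x, cv⟩ := p
      simp only [alberoFoldO] at h1
      cases hstep : alberoRecO a y (fb + 1) x cv (PySem.Dict.insert d x cv) with
      | none => rw [hstep] at h1; simp at h1
      | some d1 =>
        rw [hstep] at h1
        obtain ⟨fs3, h3⟩ := ihp st d1 r fs2 out h1 h2
        simp only [alberoRecO] at hstep
        cases hvx : PySem.Dict.get? (PySem.Dict.mk a) x with
        | none => rw [hvx] at hstep; simp at hstep
        | some vx =>
          rw [hvx] at hstep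
          obtain ⟨fs4, h4⟩ := ih _ (rest ++ st) _ d1 fs3 out hstep h3
          refine ⟨fs4 + 1, ?_⟩
          simp only [List.cons_append, alberoStackO, hvx]
          simpa [List.append_assoc] using h4

-- ===== VERDICT (by name: the statement is the Claim_ definition above) =====
theorem albero_spec : Claim_equal_albero := by
  intro a y c d i _ hpre
  obtain ⟨H1, H2⟩ := hpre
  have hi : i ∈ pvReach a i := pv_clos_extensive (by simp)
  obtain ⟨v, hv⟩ := Option.isSome_iff_exists.mp (H1 i hi)
  -- A's side returns some r
  have hArec : (alberoRecO a y (a.length + 1) i c (PySem.Dict.mk d)).isSome = true := by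
    apply (pv_suff_rec (y := y) H1 H2 (a.length + 1)).2
    · exact hi
    · have := pv_rank_le_length a i i; omega
  obtain ⟨r, hr⟩ := Option.isSome_iff_exists.mp hArec
  -- unfold one level of A: the root fold
  have hfold : alberoFoldO a y a.length
      (v.map (fun x => (x, if (v.length : Int) = y then c + 1 else c))) (PySem.Dict.mk d) = some r := by
    simpa only [alberoRecO, hv] using hr
  -- every root child is reachable
  have hkids : ∀ p ∈ v.map (fun x => (x, if (v.length : Int) = y then c + 1 else c)),
      p.1 ∈ pvReach a i := by
    intro p hp
    obtain ⟨ch, hch, rfl⟩ := List.mem_map.mp hp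
    exact pv_reach_closed hi (by rw [pv_children_eq hv]; exact hch)
  -- B's side returns some o
  have hBstack : (alberoStackO a y ((maxDeg a + 1) ^ (a.length + 1))
      (v.map (fun x => (x, if (v.length : Int) = y then c + 1 else c))) (PySem.Dict.mk d)).isSome = true := by
    apply pv_suff_stack H1 H2
    · exact hkids
    · -- pvPhi ≤ maxDeg * (maxDeg+1)^a.length, and the +1 still fits inside (maxDeg+1)^(a.length+1)
      set M := maxDeg a with hM
      have hbound : ∀ w ∈ (v.map (fun x => (x, if (v.length : Int) = y then c + 1 else c))).map
          (fun p => pvW a i p.1), w ≤ (M + 1) ^ a.length := by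
        intro w hw
        simp only [List.map_map, List.mem_map] at hw
        obtain ⟨ch, _, rfl⟩ := hw
        exact Nat.pow_le_pow_right (by omega) (pv_rank_le_length a i ch)
      have hsum := List.sum_le_card_nsmul _ _ hbound
      simp only [smul_eq_mul, List.length_map] at hsum
      have hlen : v.length ≤ M := pv_len_le_maxDeg (pv_get?_mem hv)
      have hP : 1 ≤ (M + 1) ^ a.length := Nat.one_le_pow _ _ (by omega)
      have hpow : (M + 1) ^ (a.length + 1) = M * (M + 1) ^ a.length + (M + 1) ^ a.length := by
        rw [pow_succ]; ring
      have hmul : v.length * (M + 1) ^ a.length ≤ M * (M + 1) ^ a.length :=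
        Nat.mul_le_mul_right _ hlen
      unfold pvPhi
      omega
  obtain ⟨o, ho⟩ := Option.isSome_iff_exists.mp hBstack
  -- simulation: the stack run started on the root's children also computes r
  have hnil : alberoStackO a y 1 ([] : List (Int × Int)) r = some r := by simp [alberoStackO]
  obtain ⟨fs, hfs⟩ := pv_sim a.length
    (v.map (fun x => (x, if (v.length : Int) = y then c + 1 else c))) [] (PySem.Dict.mk d) r 1 r hfold hnil
  rw [List.append_nil] at hfs
  have hro : r = o := pv_stack_unique hfs ho
  have hA : albero a y c d i = r.items := by
    unfold albero
    rw [hr]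
    rfl
  have hB : albero_alt a y c d i = o.items := by
    unfold albero_alt
    rw [hv]
    show ((alberoStackO a y ((maxDeg a + 1) ^ (a.length + 1))
        (v.map (fun x => (x, if (v.length : Int) = y then c + 1 else c)))
        (PySem.Dict.mk d)).getD (PySem.Dict.mk d)).items = o.items
    rw [ho]
    rfl
  unfold Spec_albero
  rw [hA, hB, hro]
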